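-- pv_equiv track=rewrite | github.com/YaroslavAnanich/AOIS | lab3/RDNF.py | group_by_units
-- ===== SOURCE A (Python) =====
-- def group_by_units(binary_clauses):
--     # Create a dictionary to hold the arrays
--     constituents = {}
--
--     # Process each binary clause
--     for clause in binary_clauses:
--         # Count the number of '1's in the clause
--         count_ones = clause.count('1')
--         # If the count is not already a key in the dictionary, create a new list
--         if count_ones not in constituents:
--             constituents[count_ones] = []
--         # Add the clause to the list corresponding to its count of '1's
--         constituents[count_ones].append(clause)
--     sorted_constituents = dict(sorted(constituents.items(), key=lambda x: x[0]))
--     # Return the arrays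
--     return sorted_constituents
-- ===== SOURCE B (Python) =====
-- from itertools import groupby
--
--
-- def group_by_units(binary_clauses):
--     # Stable sort by number of ones, then group consecutive runs.
--     key = lambda clause: clause.count('1')
--     return {k: list(g) for k, g in groupby(sorted(binary_clauses, key=key), key=key)}
-- ===== Notes on version B (the rewrite author's own statement) =====
-- stated objective: idiomatic
-- what changed: Replaces A's hash-bucket dict (membership test + per-key append) followed by a key-sort of the items with a single stable sort of the clauses by one-count followed by consecutive-run grouping (itertools.groupby), the idiomatic sort-then-group idiom.
import Mathlib
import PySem

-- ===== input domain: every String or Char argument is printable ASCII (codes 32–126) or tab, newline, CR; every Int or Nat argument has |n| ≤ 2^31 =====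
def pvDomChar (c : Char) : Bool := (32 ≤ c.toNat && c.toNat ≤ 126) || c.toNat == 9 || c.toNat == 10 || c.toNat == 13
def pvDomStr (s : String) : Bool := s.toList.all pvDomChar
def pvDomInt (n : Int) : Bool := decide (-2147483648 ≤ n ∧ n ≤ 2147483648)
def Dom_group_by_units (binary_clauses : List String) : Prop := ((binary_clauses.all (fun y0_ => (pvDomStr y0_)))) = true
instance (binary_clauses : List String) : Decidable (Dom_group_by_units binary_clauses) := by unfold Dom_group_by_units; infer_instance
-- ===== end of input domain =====

-- B replaces A's dict bucketing + key-sort by a single stable sort by one-count followed by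
-- consecutive-run grouping (itertools.groupby); objective: idiomatic.

-- number of '1' characters in a clause (clause.count('1'))
def pvCnt (s : String) : Int := (PySem.Str.count s "1" : Int)

-- ===== PORT A =====
def group_by_units (binary_clauses : List String) : List (Int × List String) :=
  let constituents : PySem.Dict Int (List String) :=
    binary_clauses.foldl
      (fun d clause =>
        let count_ones := pvCnt clause
        let d' := if d.contains count_ones then d else d.insert count_ones []
        d'.modify count_ones [] (fun l => l ++ [clause]))
      PySem.Dict.empty
  PySem.List.sorted constituents.items (fun x => x.1) false

-- ===== PORT B =====
-- consecutive-run grouping of an (already sorted) list, as itertools.groupby does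
def pvGroupRuns (l : List String) : List (Int × List String) :=
  match l with
  | [] => []
  | x :: xs =>
    let k := pvCnt x
    (k, x :: xs.takeWhile (fun y => pvCnt y == k)) ::
      pvGroupRuns (xs.dropWhile (fun y => pvCnt y == k))
termination_by l.length
decreasing_by
  simp only [List.length_cons]
  exact Nat.lt_succ_of_le (List.length_dropWhile_le _ _)

def group_by_units_alt (binary_clauses : List String) : List (Int × List String) :=
  pvGroupRuns (PySem.List.sorted binary_clauses pvCnt false)

-- ===== PRECONDITION & SPEC =====
def Spec_group_by_units (binary_clauses : List String) (out : List (Int × List String)) : Prop := out = group_by_units_alt binary_clauses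
instance (binary_clauses : List String) (out : List (Int × List String)) : Decidable (Spec_group_by_units binary_clauses out) := by unfold Spec_group_by_units; infer_instance

-- ===== CLAIM (what is proved, stated in full; the proofs are below) =====
def Claim_equal_group_by_units : Prop := ∀ (binary_clauses : List String), Dom_group_by_units binary_clauses → Spec_group_by_units binary_clauses (group_by_units binary_clauses)

-- ===== LEMMAS AND PROOFS =====

-- A's "ensure key, then append" step is a single Python-style modify
theorem pv_step_eq (d : PySem.Dict Int (List String)) (c : Int) (clause : String) :
    ((if d.contains c then d else d.insert c []).modify c [] (fun l => l ++ [clause]))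
      = d.modify c [] (fun l => l ++ [clause]) := by
  by_cases h : d.contains c
  · simp [h]
  · simp only [Bool.not_eq_true] at h
    simp only [h, Bool.false_eq_true, if_false, PySem.Dict.modify,
      PySem.Dict.insert_insert_self, PySem.Dict.getD_insert_self]
    rw [PySem.Dict.getD_of_not_contains]
    exact h

-- the dict built by A's loop
def pvDictA (bcs : List String) : PySem.Dict Int (List String) :=
  bcs.foldl (fun d clause => d.modify (pvCnt clause) [] (fun l => l ++ [clause])) PySem.Dict.empty

theorem pvDictA_eq_pair_fold (bcs : List String) :
    pvDictA bcs = (bcs.map (fun s => (pvCnt s, s))).foldl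
      (fun d p => d.modify p.1 [] (fun l => l ++ [p.2])) PySem.Dict.empty := by
  rw [List.foldl_map]; rfl

theorem pvDictA_getD (bcs : List String) (k : Int) :
    (pvDictA bcs).getD k [] = bcs.filter (fun s => pvCnt s == k) := by
  rw [pvDictA_eq_pair_fold, PySem.Dict.getD_foldl_modify_append]
  simp [List.filter_map, Function.comp_def]

theorem pvDictA_keys (bcs : List String) :
    (pvDictA bcs).keys = PySem.Set.ofList (bcs.map pvCnt) := by
  have h := PySem.Dict.keys_foldl_modify_key (κ := Int) (ν := List String) bcs pvCnt []
    (fun _ clause l => l ++ [clause]) PySem.Dict.empty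
  simpa [PySem.Dict.keys_empty] using h

theorem pvDictA_keys_nodup (bcs : List String) : (pvDictA bcs).keys.Nodup := by
  exact PySem.Dict.nodup_keys_foldl_modify_key (κ := Int) (ν := List String) bcs pvCnt []
    (fun _ clause l => l ++ [clause]) PySem.Dict.empty PySem.Dict.nodup_keys_empty

-- A computes: sorted distinct one-counts, each paired with the clauses having that count (in input order)
theorem pvA_char (bcs : List String) :
    group_by_units bcs =
      (PySem.List.sorted (PySem.Set.ofList (bcs.map pvCnt)) (fun x => x) false).map
        (fun k => (k, bcs.filter (fun s => pvCnt s == k))) := by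
  unfold group_by_units
  have hstep : bcs.foldl
      (fun d clause =>
        let count_ones := pvCnt clause
        let d' := if d.contains count_ones then d else d.insert count_ones []
        d'.modify count_ones [] (fun l => l ++ [clause]))
      PySem.Dict.empty = pvDictA bcs := by
    unfold pvDictA
    congr 1
    funext d clause
    exact pv_step_eq d (pvCnt clause) clause
  rw [hstep]
  show PySem.List.sorted (pvDictA bcs).items (fun x => x.1) false = _
  rw [PySem.Dict.items_eq_map_keys (pvDictA bcs) (pvDictA_keys_nodup bcs) []]
  have hmap : (pvDictA bcs).keys.map (fun k => (k, (pvDictA bcs).getD k [])) =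
      (pvDictA bcs).keys.map (fun k => (k, bcs.filter (fun s => pvCnt s == k))) := by
    refine List.map_congr_left ?_
    intro k _
    rw [pvDictA_getD]
  rw [hmap, pvDictA_keys]
  refine PySem.List.sorted_eq_of_perm_of_pairwise_lt _ _ _ ?_ ?_
  · exact (PySem.List.sorted_perm (PySem.Set.ofList (bcs.map pvCnt)) (fun x => x) false).map _
  · rw [List.pairwise_map]
    exact PySem.List.sorted_ofList_pairwise_lt (bcs.map pvCnt)

-- stability of Python's sort, as a filter equation
theorem pv_pairwise_insertBy {α : Type} (f : α → Int) (x : α) (acc : List α)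
    (h : acc.Pairwise (fun a b => f a ≤ f b)) :
    (PySem.List.insertBy (fun a b => decide (f a < f b)) x acc).Pairwise (fun a b => f a ≤ f b) := by
  induction acc with
  | nil => simp [PySem.List.insertBy]
  | cons y ys ih =>
    rw [List.pairwise_cons] at h
    simp only [PySem.List.insertBy]
    split_ifs with hb
    · simp only [decide_eq_true_eq] at hb
      refine List.Pairwise.cons ?_ (List.Pairwise.cons h.1 h.2)
      intro z hz
      rcases List.mem_cons.1 hz with rfl | hz
      · exact le_of_lt hb
      · exact le_trans (le_of_lt hb) (h.1 z hz)
    · simp only [decide_eq_true_eq, not_lt] at hb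
      refine List.Pairwise.cons ?_ (ih h.2)
      intro z hz
      rcases (PySem.List.mem_insertBy _ _ _ _).1 hz with rfl | hz
      · exact hb
      · exact h.1 z hz

theorem pv_filter_insertBy {α : Type} (f : α → Int) (k : Int) (x : α) (acc : List α)
    (h : acc.Pairwise (fun a b => f a ≤ f b)) :
    (PySem.List.insertBy (fun a b => decide (f a < f b)) x acc).filter (fun y => f y == k)
      = acc.filter (fun y => f y == k) ++ (if f x == k then [x] else []) := by
  induction acc with
  | nil => by_cases hk : (f x == k) = true <;> simp [PySem.List.insertBy, hk]
  | cons y ys ih =>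
    rw [List.pairwise_cons] at h
    by_cases hb : f x < f y
    · rw [show PySem.List.insertBy (fun a b => decide (f a < f b)) x (y :: ys)
          = x :: y :: ys from by simp [PySem.List.insertBy, hb]]
      by_cases hk : (f x == k) = true
      · have hknil : (y :: ys).filter (fun z => f z == k) = [] := by
          rw [List.filter_eq_nil_iff]
          intro z hz
          have hgt : f x < f z := by
            rcases List.mem_cons.1 hz with rfl | hz
            · exact hb
            · exact lt_of_lt_of_le hb (h.1 z hz)
          have hxk : f x = k := beq_iff_eq.1 hk
          simp only [beq_iff_eq]
          omega
        rw [List.filter_cons_of_pos (p := fun z => f z == k) hk, hknil, if_pos hk]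
        simp
      · rw [List.filter_cons_of_neg (p := fun z => f z == k) (by simpa using hk),
          if_neg hk, List.append_nil]
    · rw [show PySem.List.insertBy (fun a b => decide (f a < f b)) x (y :: ys)
          = y :: PySem.List.insertBy (fun a b => decide (f a < f b)) x ys from by
            simp [PySem.List.insertBy, hb]]
      by_cases hy : (f y == k) = true
      · rw [List.filter_cons_of_pos (p := fun z => f z == k) hy,
          List.filter_cons_of_pos (p := fun z => f z == k) hy, ih h.2, List.cons_append]
      · rw [List.filter_cons_of_neg (p := fun z => f z == k) (by simpa using hy),
          List.filter_cons_of_neg (p := fun z => f z == k) (by simpa using hy), ih h.2]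

theorem pv_filter_foldl_insertBy {α : Type} (f : α → Int) (k : Int) (xs : List α) :
    ∀ acc : List α, acc.Pairwise (fun a b => f a ≤ f b) →
    (xs.foldl (fun acc x => PySem.List.insertBy (fun a b => decide (f a < f b)) x acc) acc).filter
        (fun y => f y == k)
      = acc.filter (fun y => f y == k) ++ xs.filter (fun y => f y == k) := by
  induction xs with
  | nil => intro acc _; simp
  | cons x xs ih =>
    intro acc hacc
    rw [List.foldl_cons, ih _ (pv_pairwise_insertBy f x acc hacc),
      pv_filter_insertBy f k x acc hacc, List.filter_cons, List.append_assoc]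
    by_cases hx : f x == k
    · simp [hx]
    · simp [hx]

theorem pv_filter_sorted {α : Type} (f : α → Int) (k : Int) (xs : List α) :
    (PySem.List.sorted xs f false).filter (fun y => f y == k) = xs.filter (fun y => f y == k) := by
  have h := pv_filter_foldl_insertBy f k xs [] (List.Pairwise.nil)
  rw [← PySem.List.sorted_eq_foldl_insertBy] at h
  simpa using h

-- the run heads produced by pvGroupRuns
def pvKeys (l : List String) : List Int :=
  match l with
  | [] => []
  | x :: xs => pvCnt x :: pvKeys (xs.dropWhile (fun y => pvCnt y == pvCnt x))
termination_by l.length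
decreasing_by
  simp only [List.length_cons]
  exact Nat.lt_succ_of_le (List.length_dropWhile_le _ _)

theorem pv_mem_pvKeys (l : List String) (k : Int) :
    k ∈ pvKeys l ↔ k ∈ l.map pvCnt := by
  induction l using pvKeys.induct with
  | case1 => simp [pvKeys]
  | case2 x xs ih =>
    rw [pvKeys]
    simp only [List.mem_cons, List.map_cons, List.mem_map]
    constructor
    · rintro (rfl | hk)
      · exact Or.inl rfl
      · rcases (List.mem_map).1 (ih.1 hk) with ⟨y, hy, rfl⟩
        exact Or.inr ⟨y, (List.dropWhile_sublist _).mem hy, rfl⟩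
    · rintro (rfl | ⟨y, hy, rfl⟩)
      · exact Or.inl rfl
      · rw [← List.takeWhile_append_dropWhile (p := fun y => pvCnt y == pvCnt x) (l := xs)]
          at hy
        rcases List.mem_append.1 hy with hy | hy
        · exact Or.inl (beq_iff_eq.1
            (List.mem_takeWhile_imp (p := fun y => pvCnt y == pvCnt x) hy))
        · exact Or.inr (ih.2 (List.mem_map_of_mem hy))

-- everything past the leading run of equal counts has a strictly larger count
theorem pv_rest_gt (x : String) (xs : List String)
    (h : (x :: xs).Pairwise (fun a b => pvCnt a ≤ pvCnt b)) :
    ∀ y ∈ xs.dropWhile (fun y => pvCnt y == pvCnt x), pvCnt x < pvCnt y := by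
  induction xs with
  | nil => simp
  | cons z zs ih =>
    rw [List.pairwise_cons] at h
    rw [List.pairwise_cons] at h
    intro y hy
    by_cases hz : (pvCnt z == pvCnt x) = true
    · rw [List.dropWhile_cons, if_pos hz] at hy
      have hz' : pvCnt z = pvCnt x := beq_iff_eq.1 hz
      refine ih ?_ y hy
      rw [List.pairwise_cons]
      refine ⟨fun b hb => ?_, h.2.2⟩
      calc pvCnt x = pvCnt z := hz'.symm
        _ ≤ pvCnt b := h.2.1 b hb
    · rw [List.dropWhile_cons, if_neg hz] at hy
      have hxz : pvCnt x < pvCnt z := by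
        have h1 : pvCnt x ≤ pvCnt z := h.1 z List.mem_cons_self
        have h2 : ¬ pvCnt z = pvCnt x := by simpa using hz
        omega
      rcases List.mem_cons.1 hy with rfl | hy
      · exact hxz
      · exact lt_of_lt_of_le hxz (h.2.1 y hy)

theorem pv_pvKeys_pairwise_lt (l : List String)
    (h : l.Pairwise (fun a b => pvCnt a ≤ pvCnt b)) :
    (pvKeys l).Pairwise (fun a b => a < b) := by
  induction l using pvKeys.induct with
  | case1 => simp [pvKeys]
  | case2 x xs ih =>
    rw [pvKeys]
    have htail : (xs.dropWhile (fun y => pvCnt y == pvCnt x)).Pairwise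
        (fun a b => pvCnt a ≤ pvCnt b) :=
      List.Pairwise.sublist (List.dropWhile_sublist _) ((List.pairwise_cons.1 h).2)
    refine List.Pairwise.cons ?_ (ih htail)
    intro k hk
    rcases (List.mem_map).1 ((pv_mem_pvKeys _ k).1 hk) with ⟨y, hy, rfl⟩
    exact pv_rest_gt x xs h y hy

theorem pv_groupRuns_char (l : List String)
    (h : l.Pairwise (fun a b => pvCnt a ≤ pvCnt b)) :
    pvGroupRuns l = (pvKeys l).map (fun k => (k, l.filter (fun s => pvCnt s == k))) := by
  induction l using pvGroupRuns.induct with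
  | case1 => simp [pvGroupRuns, pvKeys]
  | case2 x xs kk ih =>
    rw [pvGroupRuns, pvKeys]
    have htail : (xs.dropWhile (fun y => pvCnt y == pvCnt x)).Pairwise
        (fun a b => pvCnt a ≤ pvCnt b) :=
      List.Pairwise.sublist (List.dropWhile_sublist _) ((List.pairwise_cons.1 h).2)
    have hrestgt := pv_rest_gt x xs h
    have hfilter_rest_nil : ∀ k : Int, pvCnt x = k →
        (xs.dropWhile (fun y => pvCnt y == pvCnt x)).filter (fun s => pvCnt s == k) = [] := by
      intro k hkx
      rw [List.filter_eq_nil_iff]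
      intro z hz
      have := hrestgt z hz
      simp only [beq_iff_eq]
      omega
    rw [List.map_cons]
    refine List.cons_eq_cons.2 ⟨?_, ?_⟩
    · -- head: (k, x :: run) = (k, (x::xs).filter (== k))
      have hx : (pvCnt x == pvCnt x) = true := beq_iff_eq.2 rfl
      have hsplit : xs.filter (fun s => pvCnt s == pvCnt x)
          = xs.takeWhile (fun y => pvCnt y == pvCnt x) := by
        conv_lhs => rw [← List.takeWhile_append_dropWhile
          (p := fun y => pvCnt y == pvCnt x) (l := xs)]
        rw [List.filter_append,
          List.filter_eq_self.2
            (fun a ha => List.mem_takeWhile_imp (p := fun y => pvCnt y == pvCnt x) ha),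
          hfilter_rest_nil (pvCnt x) rfl, List.append_nil]
      rw [List.filter_cons_of_pos (p := fun s => pvCnt s == pvCnt x) hx, hsplit]
    · -- tail
      rw [ih htail]
      refine List.map_congr_left ?_
      intro k hk
      rcases (List.mem_map).1 ((pv_mem_pvKeys _ k).1 hk) with ⟨y, hy, rfl⟩
      have hkgt : pvCnt x < pvCnt y := hrestgt y hy
      refine congrArg _ ?_
      have hxne : (pvCnt x == pvCnt y) = false := by
        simp only [beq_eq_false_iff_ne, ne_eq]
        omega
      rw [List.filter_cons_of_neg (p := fun s => pvCnt s == pvCnt y) (by simp [hxne])]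
      have htw : (xs.takeWhile (fun y => pvCnt y == pvCnt x)).filter
          (fun s => pvCnt s == pvCnt y) = [] := by
        rw [List.filter_eq_nil_iff]
        intro z hz
        have hz0 := List.mem_takeWhile_imp hz
        have hz' : pvCnt z = pvCnt x := beq_iff_eq.1 hz0
        simp only [beq_iff_eq]
        omega
      conv_rhs => rw [← List.takeWhile_append_dropWhile
        (p := fun y => pvCnt y == pvCnt x) (l := xs)]
      rw [List.filter_append, htw, List.nil_append]

-- ===== VERDICT (by name: the statement is the Claim_ definition above) =====
theorem group_by_units_spec : Claim_equal_group_by_units := by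
  intro bcs _
  unfold Spec_group_by_units group_by_units_alt
  have hsp : (PySem.List.sorted bcs pvCnt false).Pairwise (fun a b => pvCnt a ≤ pvCnt b) :=
    PySem.List.sorted_pairwise bcs pvCnt
  have hperm : (PySem.List.sorted bcs pvCnt false).Perm bcs :=
    PySem.List.sorted_perm bcs pvCnt false
  rw [pv_groupRuns_char _ hsp, pvA_char bcs]
  have hkeys : PySem.List.sorted (PySem.Set.ofList (bcs.map pvCnt)) (fun x => x) false
      = pvKeys (PySem.List.sorted bcs pvCnt false) := by
    refine PySem.List.sorted_eq_of_perm_of_pairwise_lt _ _ _ ?_ (pv_pvKeys_pairwise_lt _ hsp)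
    refine (List.perm_ext_iff_of_nodup ?_ (PySem.Set.nodup_ofList _)).2 ?_
    · exact (pv_pvKeys_pairwise_lt _ hsp).imp (fun hab => ne_of_lt hab)
    · intro k
      rw [pv_mem_pvKeys, PySem.Set.mem_ofList]
      constructor
      · rintro hk
        rcases (List.mem_map).1 hk with ⟨y, hy, rfl⟩
        exact List.mem_map_of_mem (hperm.mem_iff.1 hy)
      · intro hk
        rcases (List.mem_map).1 hk with ⟨y, hy, rfl⟩
        exact List.mem_map_of_mem (hperm.mem_iff.2 hy)
  rw [hkeys]
  refine List.map_congr_left ?_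
  intro k _
  exact congrArg _ (pv_filter_sorted pvCnt k bcs).symm
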